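-- pv_equiv track=rewrite | github.com/smaciasg/OOP_Coding_Dojo | mascotas_dojo/ClaseMascota.py | validador_tipo_mascotas
-- ===== SOURCE A (Python) =====
-- def validador_tipo_mascotas(tipo):
--     tipos_mascotas = {
--         "volador": ["buho","gaviota","loro","mariposa","palona","canario"],
--         "acuatico": ["pez","delfin","pulpo","ostra","caballos_mar"],
--         "terrestre": ["vaca","perro","gato"]
--     }
--     for key in tipos_mascotas:
--         for i in range(0,len(tipos_mascotas[key])):
--             if tipo == tipos_mascotas[key][i]:
--                 return key
-- ===== SOURCE B (Python) =====
-- _CATEGORIA_POR_TIPO = {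
--     "buho": "volador", "gaviota": "volador", "loro": "volador",
--     "mariposa": "volador", "palona": "volador", "canario": "volador",
--     "pez": "acuatico", "delfin": "acuatico", "pulpo": "acuatico",
--     "ostra": "acuatico", "caballos_mar": "acuatico",
--     "vaca": "terrestre", "perro": "terrestre", "gato": "terrestre",
-- }
--
-- def validador_tipo_mascotas(tipo):
--     return _CATEGORIA_POR_TIPO.get(tipo)
-- ===== Notes on version B (the rewrite author's own statement) =====
-- stated objective: idiomatic
-- what changed: Replaced the nested scan over the category table with a flat reverse-lookup dict from pet type to category and a single .get(tipo).
import Mathlib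
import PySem

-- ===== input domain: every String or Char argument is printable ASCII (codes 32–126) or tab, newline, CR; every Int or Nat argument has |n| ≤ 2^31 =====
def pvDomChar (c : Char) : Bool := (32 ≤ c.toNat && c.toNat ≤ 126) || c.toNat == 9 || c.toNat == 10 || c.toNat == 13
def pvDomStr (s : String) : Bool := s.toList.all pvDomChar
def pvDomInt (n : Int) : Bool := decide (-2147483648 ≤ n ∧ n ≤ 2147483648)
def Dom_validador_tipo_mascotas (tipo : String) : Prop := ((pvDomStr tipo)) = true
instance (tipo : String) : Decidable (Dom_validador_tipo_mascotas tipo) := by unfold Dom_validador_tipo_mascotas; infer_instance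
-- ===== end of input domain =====

-- B replaces A's nested scan over the category table with a flat type→category dict and one .get (idiomatic).

-- ===== PORT A =====
-- the dict literal 'tipos_mascotas' (insertion order)
def pvTiposMascotas : PySem.Dict String (List String) :=
  PySem.Dict.ofList [("volador", ["buho","gaviota","loro","mariposa","palona","canario"]),
   ("acuatico", ["pez","delfin","pulpo","ostra","caballos_mar"]),
   ("terrestre", ["vaca","perro","gato"])]

-- inner loop: 'for i in range(0, len(tipos_mascotas[key])): if tipo == …[key][i]: return key'
def pvInnerA (tipo key : String) (lst : List String) : List Int → Option String
  | [] => none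
  | i :: rest =>
    if some tipo = PySem.List.pyGet? lst i then some key
    else pvInnerA tipo key lst rest

-- outer loop: 'for key in tipos_mascotas:'
def pvOuterA (tipo : String) : List (String × List String) → Option String
  | [] => none
  | (key, lst) :: rest =>
    match pvInnerA tipo key lst (PySem.List.pyRange 0 (PySem.List.len lst) 1) with
    | some r => some r
    | none => pvOuterA tipo rest

def validador_tipo_mascotas (tipo : String) : Option String :=
  pvOuterA tipo pvTiposMascotas.items

-- ===== PORT B =====
-- the flat reverse-lookup dict '_CATEGORIA_POR_TIPO'
def pvCategoriaPorTipo : PySem.Dict String String :=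
  PySem.Dict.ofList [("buho","volador"),("gaviota","volador"),("loro","volador"),
   ("mariposa","volador"),("palona","volador"),("canario","volador"),
   ("pez","acuatico"),("delfin","acuatico"),("pulpo","acuatico"),
   ("ostra","acuatico"),("caballos_mar","acuatico"),
   ("vaca","terrestre"),("perro","terrestre"),("gato","terrestre")]

def validador_tipo_mascotas_alt (tipo : String) : Option String :=
  PySem.Dict.get? pvCategoriaPorTipo tipo

-- ===== PRECONDITION & SPEC =====
def Spec_validador_tipo_mascotas (tipo : String) (out : Option String) : Prop := out = validador_tipo_mascotas_alt tipo
instance (tipo : String) (out : Option String) : Decidable (Spec_validador_tipo_mascotas tipo out) := by unfold Spec_validador_tipo_mascotas; infer_instance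

-- ===== CLAIM (what is proved, stated in full; the proofs are below) =====
def Claim_equal_validador_tipo_mascotas : Prop := ∀ (tipo : String), Dom_validador_tipo_mascotas tipo → Spec_validador_tipo_mascotas tipo (validador_tipo_mascotas tipo)

-- ===== LEMMAS AND PROOFS =====

-- ===== VERDICT (by name: the statement is the Claim_ definition above) =====
set_option maxHeartbeats 1600000 in
theorem validador_tipo_mascotas_spec : Claim_equal_validador_tipo_mascotas := by
  intro tipo _
  show validador_tipo_mascotas tipo = validador_tipo_mascotas_alt tipo
  by_cases h1 : tipo = "buho"; · subst h1; decide
  by_cases h2 : tipo = "gaviota"; · subst h2; decide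
  by_cases h3 : tipo = "loro"; · subst h3; decide
  by_cases h4 : tipo = "mariposa"; · subst h4; decide
  by_cases h5 : tipo = "palona"; · subst h5; decide
  by_cases h6 : tipo = "canario"; · subst h6; decide
  by_cases h7 : tipo = "pez"; · subst h7; decide
  by_cases h8 : tipo = "delfin"; · subst h8; decide
  by_cases h9 : tipo = "pulpo"; · subst h9; decide
  by_cases h10 : tipo = "ostra"; · subst h10; decide
  by_cases h11 : tipo = "caballos_mar"; · subst h11; decide
  by_cases h12 : tipo = "vaca"; · subst h12; decide
  by_cases h13 : tipo = "perro"; · subst h13; decide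
  by_cases h14 : tipo = "gato"; · subst h14; decide
  simp only [validador_tipo_mascotas, validador_tipo_mascotas_alt]
  rw [show pvTiposMascotas.items =
      [("volador", ["buho","gaviota","loro","mariposa","palona","canario"]),
       ("acuatico", ["pez","delfin","pulpo","ostra","caballos_mar"]),
       ("terrestre", ["vaca","perro","gato"])] from rfl]
  rw [show pvCategoriaPorTipo = PySem.Dict.mk
      [("buho","volador"),("gaviota","volador"),("loro","volador"),
       ("mariposa","volador"),("palona","volador"),("canario","volador"),
       ("pez","acuatico"),("delfin","acuatico"),("pulpo","acuatico"),
       ("ostra","acuatico"),("caballos_mar","acuatico"),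
       ("vaca","terrestre"),("perro","terrestre"),("gato","terrestre")] from rfl]
  simp [show PySem.List.pyRange 0 6 1 = ([0,1,2,3,4,5] : List Int) from by decide,
    show PySem.List.pyRange 0 5 1 = ([0,1,2,3,4] : List Int) from by decide,
    show PySem.List.pyRange 0 3 1 = ([0,1,2] : List Int) from by decide,
    pvOuterA, pvInnerA, PySem.Dict.get?, PySem.List.pyGet?, PySem.List.pyIdx?,
    h1, h2, h3, h4, h5, h6, h7, h8, h9, h10, h11, h12, h13, h14,
    Ne.symm h1, Ne.symm h2, Ne.symm h3, Ne.symm h4, Ne.symm h5, Ne.symm h6, Ne.symm h7,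
    Ne.symm h8, Ne.symm h9, Ne.symm h10, Ne.symm h11, Ne.symm h12, Ne.symm h13, Ne.symm h14]
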